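-- pv_equiv track=rewrite | github.com/PromptForgeAI/BACKEND | demon_engine/helpers.py | _ensure_markdown_structure
-- ===== SOURCE A (Python) =====
-- def _ensure_markdown_structure(text: str) -> str:
--     """Ensure proper markdown structure"""
--     lines = text.split('\n')
--     structured_lines = []
--
--     for line in lines:
--         # Ensure headers have proper spacing
--         if line.startswith('#') and not line.startswith('# '):
--             line = line.replace('#', '# ', 1)
--
--         structured_lines.append(line)
--
--     return '\n'.join(structured_lines)
-- ===== SOURCE B (Python) =====
-- def _ensure_markdown_structure(text: str) -> str:
--     """Ensure proper markdown structure (single char-level pass, no split/join of lines)."""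
--     out = []
--     at_start = True
--     n = len(text)
--     for i, c in enumerate(text):
--         if at_start and c == '#' and (i + 1 == n or text[i + 1] != ' '):
--             out.append('# ')
--         else:
--             out.append(c)
--         at_start = c == '\n'
--     return ''.join(out)
-- ===== Notes on version B (the rewrite author's own statement) =====
-- stated objective: alternative
-- what changed: Replaces split-into-lines / per-line startswith+replace / join with one character-level pass that tracks line starts and inserts the space after a '#' at a line start with no following space.
import Mathlib
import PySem

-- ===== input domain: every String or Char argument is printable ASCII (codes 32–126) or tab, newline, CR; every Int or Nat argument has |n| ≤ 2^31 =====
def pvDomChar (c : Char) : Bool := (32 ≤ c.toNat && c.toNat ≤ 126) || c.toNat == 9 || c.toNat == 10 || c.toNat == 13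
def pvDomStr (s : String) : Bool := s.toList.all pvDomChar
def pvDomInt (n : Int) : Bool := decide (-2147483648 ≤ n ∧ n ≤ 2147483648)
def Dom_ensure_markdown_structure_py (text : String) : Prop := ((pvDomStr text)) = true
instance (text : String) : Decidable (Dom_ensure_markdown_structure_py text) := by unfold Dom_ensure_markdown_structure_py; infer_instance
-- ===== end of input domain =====

-- B replaces A's split-into-lines / per-line fix / join with one character-level pass
-- tracking line starts (alternative decomposition, same cost).

-- ===== PORT A =====

-- line.replace('#', '# ', 1): replace the first occurrence of '#' (exact hand port;
-- PySem.Str.replace has no count argument).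
def pvReplace1 : List Char → List Char
  | [] => []
  | c :: rest => if c = '#' then '#' :: ' ' :: rest else c :: pvReplace1 rest

def pvFixLine (line : List Char) : List Char :=
  if PySem.Chars.startswith line ['#'] && !(PySem.Chars.startswith line ['#', ' ']) then
    pvReplace1 line
  else line

def ensure_markdown_structure_py (text : String) : String :=
  let lines := PySem.Chars.splitOn text.toList ['\n']
  let structured_lines := lines.foldl (fun acc line => acc ++ [pvFixLine line]) []
  String.mk (PySem.Chars.join ['\n'] structured_lines)

-- ===== PORT B =====

-- one pass over the characters; `atStart` = "at the start of a line";
-- the lookahead `text[i+1] != ' '` of Source B is the match on `rest.head?`.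
def pvPass : Bool → List Char → List Char
  | _, [] => []
  | atStart, c :: rest =>
    if atStart && c = '#' && !(rest.head? = some ' ') then
      '#' :: ' ' :: pvPass false rest
    else
      c :: pvPass (c = '\n') rest

def ensure_markdown_structure_py_alt (text : String) : String :=
  String.mk (pvPass true text.toList)

-- ===== PRECONDITION & SPEC =====
def Spec_ensure_markdown_structure_py (text : String) (out : String) : Prop := out = ensure_markdown_structure_py_alt text
instance (text : String) (out : String) : Decidable (Spec_ensure_markdown_structure_py text out) := by unfold Spec_ensure_markdown_structure_py; infer_instance

-- ===== CLAIM (what is proved, stated in full; the proofs are below) =====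
def Claim_equal_ensure_markdown_structure_py : Prop := ∀ (text : String), Dom_ensure_markdown_structure_py text → Spec_ensure_markdown_structure_py text (ensure_markdown_structure_py text)

-- ===== LEMMAS AND PROOFS =====

theorem pvFoldl_push {α β : Type} (f : α → β) :
    ∀ (l : List α) (init : List β),
    l.foldl (fun acc line => acc ++ [f line]) init = init ++ l.map f := by
  intro l
  induction l with
  | nil => intro init; simp
  | cons a t ih => intro init; simp [List.foldl, ih]

def pvSplit : List Char → List Char × List (List Char)
  | [] => ([], [])
  | c :: cs =>
    let p := pvSplit cs
    if c = '\n' then ([], p.1 :: p.2) else (c :: p.1, p.2)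

theorem pvSplit_head_space (cs : List Char) :
    ((pvSplit cs).1.head? = some ' ') ↔ (cs.head? = some ' ') := by
  cases cs with
  | nil => simp [pvSplit]
  | cons d t =>
    by_cases h : d = '\n' <;> simp [pvSplit, h]

theorem pvPrefix_head (x : Char) (p : List Char) :
    ([x].isPrefixOf p = true) ↔ p.head? = some x := by
  cases p with
  | nil => simp [List.isPrefixOf]
  | cons a b =>
    simp only [List.isPrefixOf, List.head?_cons, Option.some_inj, Bool.and_eq_true, beq_iff_eq,
      List.isPrefixOf_nil_left, and_true]
    exact eq_comm

theorem pvJoin_cons (x : Char) (p : List Char) (rest : List (List Char)) :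
    PySem.Chars.join ['\n'] ((x :: p) :: rest) = x :: PySem.Chars.join ['\n'] (p :: rest) := by
  cases rest <;> simp [PySem.Chars.join_singleton, PySem.Chars.join_cons_cons]

theorem pvPass_eq (cs : List Char) :
    pvPass true cs =
      PySem.Chars.join ['\n'] (pvFixLine (pvSplit cs).1 :: (pvSplit cs).2.map pvFixLine) ∧
    pvPass false cs =
      PySem.Chars.join ['\n'] ((pvSplit cs).1 :: (pvSplit cs).2.map pvFixLine) := by
  induction cs with
  | nil => constructor <;> simp [pvPass, pvSplit, pvFixLine, PySem.Chars.startswith,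
      PySem.Chars.join_singleton]
  | cons c t ih =>
    obtain ⟨ih1, ih2⟩ := ih
    by_cases hn : c = '\n'
    · subst hn
      constructor
      · simp only [pvPass, pvSplit]
        norm_num
        rw [ih1]
        cases h2 : (pvSplit t).2 <;>
          simp [pvFixLine, PySem.Chars.startswith, PySem.Chars.join_singleton,
            PySem.Chars.join_cons_cons, h2]
      · simp only [pvPass, pvSplit]
        norm_num
        rw [ih1]
        cases h2 : (pvSplit t).2 <;>
          simp [pvFixLine, PySem.Chars.startswith, PySem.Chars.join_singleton,
            PySem.Chars.join_cons_cons, h2]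
    · by_cases hh : c = '#'
      · subst hh
        constructor
        · by_cases hs : t.head? = some ' '
          · have hs' : ((pvSplit t).1.head? = some ' ') := (pvSplit_head_space t).2 hs
            simp [pvPass, pvSplit, pvFixLine, PySem.Chars.startswith, hs,
              List.isPrefixOf, pvJoin_cons, ih2, (pvPrefix_head ' ' _).2 hs']
          · have hs' : ¬ ([' '].isPrefixOf (pvSplit t).1 = true) := fun h =>
              hs ((pvSplit_head_space t).1 ((pvPrefix_head ' ' _).1 h))
            simp [pvPass, pvSplit, pvFixLine, pvReplace1, PySem.Chars.startswith, hs,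
              List.isPrefixOf, pvJoin_cons, ih2, hs']
        · simp [pvPass, pvSplit, pvFixLine, pvReplace1, PySem.Chars.startswith,
            List.isPrefixOf, pvJoin_cons, ih2]
      · have hh' : ¬('#' = c) := fun e => hh e.symm
        constructor <;>
          simp [pvPass, pvSplit, pvFixLine, PySem.Chars.startswith, hn, hh, hh',
            List.isPrefixOf, pvJoin_cons, ih2]

theorem pvGo_eq : ∀ (fuel : ℕ) (l cur : List Char) (acc : List (List Char)),
    l.length < fuel →
    PySem.Chars.splitOn.go ['\n'] fuel l cur acc =
      acc.reverse ++ ((cur.reverse ++ (pvSplit l).1) :: (pvSplit l).2) := by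
  intro fuel
  induction fuel with
  | zero => intro l cur acc h; omega
  | succ n ih =>
    intro l cur acc h
    cases l with
    | nil => simp [PySem.Chars.splitOn.go, pvSplit]
    | cons c rest =>
      by_cases hc : c = '\n'
      · subst hc
        rw [show PySem.Chars.splitOn.go ['\n'] (n+1) ('\n'::rest) cur acc =
            PySem.Chars.splitOn.go ['\n'] n rest [] (cur.reverse :: acc) by
          simp [PySem.Chars.splitOn.go, List.isPrefixOf]]
        rw [ih rest [] (cur.reverse :: acc) (by simpa using Nat.lt_of_succ_lt_succ h)]
        simp [pvSplit]
      · have hne : (['\n'].isPrefixOf (c :: rest)) = false := by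
          simp [List.isPrefixOf]; exact fun e => absurd e.symm hc
        rw [show PySem.Chars.splitOn.go ['\n'] (n+1) (c::rest) cur acc =
            PySem.Chars.splitOn.go ['\n'] n rest (c :: cur) acc by
          simp [PySem.Chars.splitOn.go, hne]]
        rw [ih rest (c :: cur) acc (by simpa using Nat.lt_of_succ_lt_succ h)]
        simp [pvSplit, hc]

theorem pvSplitOn_eq (cs : List Char) :
    PySem.Chars.splitOn cs ['\n'] = (pvSplit cs).1 :: (pvSplit cs).2 := by
  unfold PySem.Chars.splitOn
  rw [pvGo_eq (cs.length + 1) cs [] [] (by omega)]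
  simp

-- ===== VERDICT (by name: the statement is the Claim_ definition above) =====
theorem ensure_markdown_structure_py_spec : Claim_equal_ensure_markdown_structure_py := by
  intro text _
  unfold Spec_ensure_markdown_structure_py ensure_markdown_structure_py ensure_markdown_structure_py_alt
  simp only [pvSplitOn_eq]
  rw [pvFoldl_push, (pvPass_eq text.toList).1]
  simp
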